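-- pv_equiv track=rewrite | github.com/xhy0303/- | 作业/Python程序设计/作业1/MasterMind.py | vaildGuess
-- ===== SOURCE A (Python) =====
-- def vaildGuess(str):
--     if(len(str)!=5):
--         return False
--     else:
--         for i in range(len(str)):
--             for n in range(i+1,len(str)):
--                 if(str[i]==str[n]):
--                     return False
--     return True
-- ===== SOURCE B (Python) =====
-- def vaildGuess(str):
--     return len(str) == 5 and len(set(str)) == 5
-- ===== Notes on version B (the rewrite author's own statement) =====
-- stated objective: simpler
-- what changed: Replaced the O(n^2) nested pairwise loops with a single deduplication into a set and a length comparison.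
import Mathlib
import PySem

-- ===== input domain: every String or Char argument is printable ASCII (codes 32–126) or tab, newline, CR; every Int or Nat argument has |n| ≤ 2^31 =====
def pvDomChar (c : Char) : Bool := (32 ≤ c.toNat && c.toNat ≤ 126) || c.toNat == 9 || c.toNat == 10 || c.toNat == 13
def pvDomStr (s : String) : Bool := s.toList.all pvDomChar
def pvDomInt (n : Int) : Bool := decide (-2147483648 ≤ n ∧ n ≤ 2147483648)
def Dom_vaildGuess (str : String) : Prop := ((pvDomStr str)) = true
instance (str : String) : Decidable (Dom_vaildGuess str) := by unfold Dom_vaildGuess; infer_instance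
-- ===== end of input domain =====

-- B replaces A's O(n^2) nested pairwise scan by one set-deduplication and a length comparison (simpler).

-- ===== PORT A =====
-- Literal port: length guard, then nested for-loops over range(len) / range(i+1, len)
-- with an early `return False` on the first equal pair (rendered as List.any).
-- Indices produced by pyRange are in range, so pyGetD is exact for str[i]/str[n].
def vaildGuess (str : String) : Bool :=
  let cs := str.toList
  if PySem.Str.len str ≠ 5 then false
  else if (PySem.List.pyRange 0 (PySem.Str.len str) 1).any (fun i =>
      (PySem.List.pyRange (i + 1) (PySem.Str.len str) 1).any (fun n =>
        PySem.List.pyGetD cs i ' ' == PySem.List.pyGetD cs n ' '))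
    then false
  else true

-- ===== PORT B =====
def vaildGuess_alt (str : String) : Bool :=
  PySem.Str.len str == 5 && PySem.Set.len (PySem.Set.ofList str.toList) == 5

-- ===== PRECONDITION & SPEC =====
def Spec_vaildGuess (str : String) (out : Bool) : Prop := out = vaildGuess_alt str
instance (str : String) (out : Bool) : Decidable (Spec_vaildGuess str out) := by unfold Spec_vaildGuess; infer_instance

-- ===== CLAIM (what is proved, stated in full; the proofs are below) =====
def Claim_equal_vaildGuess : Prop := ∀ (str : String), Dom_vaildGuess str → Spec_vaildGuess str (vaildGuess str)

-- ===== LEMMAS AND PROOFS =====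

-- A's nested pairwise scan finds an equal pair iff the list has a duplicate.
lemma anyPair_iff (cs : List Char) :
    (((PySem.List.pyRange 0 (cs.length : Int) 1).any (fun i =>
      (PySem.List.pyRange (i + 1) (cs.length : Int) 1).any (fun n =>
        PySem.List.pyGetD cs i ' ' == PySem.List.pyGetD cs n ' '))) = true) ↔ ¬ cs.Nodup := by
  constructor
  · intro h hnd
    rw [List.any_eq_true] at h
    obtain ⟨i, hi, h2⟩ := h
    rw [PySem.List.mem_pyRange_one] at hi
    rw [List.any_eq_true] at h2
    obtain ⟨n, hn, he⟩ := h2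
    rw [PySem.List.mem_pyRange_one] at hn
    lift i to ℕ using hi.1 with i'
    lift n to ℕ using (by omega : (0:Int) ≤ n) with n'
    have hi' : i' < cs.length := by exact_mod_cast hi.2
    have hn' : n' < cs.length := by exact_mod_cast hn.2
    rw [PySem.List.pyGetD_natCast, PySem.List.pyGetD_natCast] at he
    have heq : cs[i'] = cs[n'] := by
      rw [List.getD_eq_getElem?_getD, List.getD_eq_getElem?_getD,
          List.getElem?_eq_getElem hi', List.getElem?_eq_getElem hn'] at he
      simpa using he
    have := (List.Nodup.getElem_inj_iff hnd (hi := hi') (hj := hn')).mp heq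
    omega
  · intro hnd
    rw [List.nodup_iff_getElem?_ne_getElem?] at hnd
    push Not at hnd
    obtain ⟨i, j, hij, hj, heq⟩ := hnd
    have hi : i < cs.length := lt_trans hij hj
    rw [List.any_eq_true]
    refine ⟨(i : Int), ?_, ?_⟩
    · rw [PySem.List.mem_pyRange_one]
      constructor <;> omega
    · rw [List.any_eq_true]
      refine ⟨(j : Int), ?_, ?_⟩
      · rw [PySem.List.mem_pyRange_one]
        constructor <;> omega
      · rw [PySem.List.pyGetD_natCast, PySem.List.pyGetD_natCast]
        have heq' : cs[i] = cs[j] := by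
          rw [List.getElem?_eq_getElem hi, List.getElem?_eq_getElem hj] at heq
          exact Option.some.inj heq
        rw [List.getD_eq_getElem?_getD, List.getD_eq_getElem?_getD,
            List.getElem?_eq_getElem hi, List.getElem?_eq_getElem hj]
        simpa using heq'

lemma anyPair_eq (cs : List Char) :
    ((PySem.List.pyRange 0 (cs.length : Int) 1).any (fun i =>
      (PySem.List.pyRange (i + 1) (cs.length : Int) 1).any (fun n =>
        PySem.List.pyGetD cs i ' ' == PySem.List.pyGetD cs n ' '))) = !decide cs.Nodup := by
  rw [Bool.eq_iff_iff, anyPair_iff]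
  simp

-- len(set(cs)) = len(cs) iff cs has no duplicates.
lemma len_ofList_eq_iff (cs : List Char) :
    (PySem.Set.ofList cs).length = cs.length ↔ cs.Nodup := by
  constructor
  · intro h
    have hnd : (PySem.Set.ofList cs).Nodup := PySem.Set.nodup_ofList cs
    have hfin : (PySem.Set.ofList cs).toFinset = cs.toFinset := by
      ext x; simp [List.mem_toFinset, PySem.Set.mem_ofList]
    have hcard : cs.toFinset.card = cs.length := by
      rw [← hfin, List.toFinset_card_of_nodup hnd, h]
    have h2 := Multiset.toFinset_card_eq_card_iff_nodup (m := (cs : Multiset Char))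
    simp only [Multiset.coe_card, Multiset.coe_nodup] at h2
    exact h2.mp (by simpa using hcard)
  · intro h
    rw [PySem.Set.ofList_eq_self_of_nodup cs h]

-- ===== VERDICT (by name: the statement is the Claim_ definition above) =====
theorem vaildGuess_spec : Claim_equal_vaildGuess := by
  intro str _
  unfold Spec_vaildGuess vaildGuess vaildGuess_alt
  simp only [PySem.Str.len_eq]
  by_cases h5 : str.toList.length = 5
  · have h5i : ((str.toList.length : Int) = 5) := by exact_mod_cast h5
    rw [if_neg (by omega)]
    have hb : ((str.toList.length : Int) == 5) = true := by simpa using h5i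
    rw [hb, Bool.true_and]
    simp only [anyPair_eq]
    by_cases hnd : str.toList.Nodup
    · simp only [hnd, decide_true, Bool.not_true, Bool.false_eq_true, if_false]
      have hl : (PySem.Set.ofList str.toList).len = 5 := by
        rw [PySem.Set.ofList_eq_self_of_nodup str.toList hnd]
        exact h5i
      rw [hl]
      rfl
    · simp only [hnd, decide_false, Bool.not_false, if_true]
      have hne : (PySem.Set.ofList str.toList).length ≠ 5 := by
        intro hc
        exact hnd ((len_ofList_eq_iff str.toList).mp (by rw [hc, h5]))
      have hz : ((PySem.Set.ofList str.toList).len == 5) = false := by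
        have : (PySem.Set.ofList str.toList).len ≠ 5 := by
          simp only [PySem.Set.len]
          exact_mod_cast hne
        simpa using this
      rw [hz]
  · have h5i : ((str.toList.length : Int) ≠ 5) := by exact_mod_cast h5
    have hb : ((str.toList.length : Int) == 5) = false := by simpa using h5i
    rw [if_pos h5i, hb, Bool.false_and]
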